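-- pv_equiv track=rewrite | github.com/hauntinghd/studionyptixd | backend_settings.py | _split_env_values
-- ===== SOURCE A (Python) =====
-- def _split_env_values(raw: str) -> list[str]:
--     values: list[str] = []
--     for chunk in str(raw or "").replace("\r", "\n").replace(";", ",").split("\n"):
--         for value in str(chunk or "").split(","):
--             cleaned = str(value or "").strip().strip('"').strip("'")
--             if cleaned:
--                 values.append(cleaned)
--     return values
-- ===== SOURCE B (Python) =====
-- def _split_env_values(raw: str) -> list[str]:
--     values: list[str] = []
--     token: list[str] = []
--
--     def flush() -> None:
--         cleaned = "".join(token).strip().strip('"').strip("'")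
--         if cleaned:
--             values.append(cleaned)
--         token.clear()
--
--     for ch in str(raw or ""):
--         if ch in "\r\n;,":
--             flush()
--         else:
--             token.append(ch)
--     flush()
--     return values
-- ===== Notes on version B (the rewrite author's own statement) =====
-- stated objective: alternative
-- what changed: Replaces A's two replace passes plus nested newline-split/comma-split loops with a single left-to-right character scan that flushes a token buffer at each of the four separator characters.
import Mathlib
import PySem

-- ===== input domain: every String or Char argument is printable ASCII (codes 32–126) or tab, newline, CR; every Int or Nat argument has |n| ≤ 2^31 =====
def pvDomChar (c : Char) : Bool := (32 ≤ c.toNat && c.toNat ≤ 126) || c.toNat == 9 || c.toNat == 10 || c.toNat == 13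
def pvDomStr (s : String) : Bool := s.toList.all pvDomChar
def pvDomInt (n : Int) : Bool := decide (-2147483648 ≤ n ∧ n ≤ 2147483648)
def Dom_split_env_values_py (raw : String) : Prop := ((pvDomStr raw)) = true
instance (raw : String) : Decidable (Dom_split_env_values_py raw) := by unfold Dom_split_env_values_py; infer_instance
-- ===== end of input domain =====

-- B replaces A's replace+split+nested-split with a single left-to-right scan that flushes a
-- token buffer at each separator character (alternative decomposition, same cost).

-- ===== PORT A =====
-- `str(raw or "")` and `str(chunk or "")`/`str(value or "")` are the identity on str values
-- (a falsy str IS ""), so the port reads the string directly.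
def split_env_values_py (raw : String) : List String :=
  let s1 := PySem.Chars.replace (PySem.Chars.replace raw.toList ['\r'] ['\n']) [';'] [',']
  (PySem.Chars.splitOn s1 ['\n']).foldl
    (fun values chunk =>
      (PySem.Chars.splitOn chunk [',']).foldl
        (fun values v =>
          let cleaned :=
            PySem.Chars.stripChars (PySem.Chars.stripChars (PySem.Chars.strip v) ['"']) ['\'']
          if cleaned.isEmpty then values else values ++ [String.ofList cleaned])
        values)
    []

-- ===== PORT B =====
def pvIsSep (c : Char) : Bool := c == '\r' || c == '\n' || c == ';' || c == ','

def pvFlush (values : List String) (token : List Char) : List String :=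
  let cleaned :=
    PySem.Chars.stripChars (PySem.Chars.stripChars (PySem.Chars.strip token) ['"']) ['\'']
  if cleaned.isEmpty then values else values ++ [String.ofList cleaned]

def pvStep (st : List String × List Char) (c : Char) : List String × List Char :=
  if pvIsSep c then (pvFlush st.1 st.2, []) else (st.1, st.2 ++ [c])

def split_env_values_py_alt (raw : String) : List String :=
  let st := raw.toList.foldl pvStep ([], [])
  pvFlush st.1 st.2

-- ===== PRECONDITION & SPEC =====
def Spec_split_env_values_py (raw : String) (out : List String) : Prop := out = split_env_values_py_alt raw
instance (raw : String) (out : List String) : Decidable (Spec_split_env_values_py raw out) := by unfold Spec_split_env_values_py; infer_instance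

-- ===== CLAIM (what is proved, stated in full; the proofs are below) =====
def Claim_equal_split_env_values_py : Prop := ∀ (raw : String), Dom_split_env_values_py raw → Spec_split_env_values_py raw (split_env_values_py raw)

-- ===== LEMMAS AND PROOFS =====

-- Reference splitter: split a char list at every char satisfying p (Python split keeps empty pieces).
def pvSplitP (p : Char → Bool) : List Char → List (List Char)
  | [] => [[]]
  | c :: cs => if p c then [] :: pvSplitP p cs else (pvSplitP p cs).modifyHead (c :: ·)

theorem pvSplitP_ne_nil (p : Char → Bool) (l : List Char) : pvSplitP p l ≠ [] := by
  cases l with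
  | nil => simp [pvSplitP]
  | cons c cs =>
    simp only [pvSplitP]
    split
    · simp
    · cases h : pvSplitP p cs with
      | nil => exact absurd h (pvSplitP_ne_nil p cs)
      | cons a t => simp

theorem pvReplaceGo (a b : Char) : ∀ (fuel : Nat) (l acc : List Char), l.length ≤ fuel →
    PySem.Chars.replace.go [a] [b] fuel l acc = acc.reverse ++ l.map (fun c => if c = a then b else c) := by
  intro fuel
  induction fuel with
  | zero =>
    intro l acc h
    have : l = [] := List.length_eq_zero_iff.mp (Nat.le_zero.mp h)
    subst this; simp [PySem.Chars.replace.go]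
  | succ n ih =>
    intro l acc h
    cases l with
    | nil => simp [PySem.Chars.replace.go]
    | cons c t =>
      simp only [PySem.Chars.replace.go]
      by_cases hc : a = c
      · subst hc
        simp only [List.isPrefixOf, beq_self_eq_true, Bool.true_and, if_true]
        rw [ih _ _ (by simpa using Nat.le_of_succ_le_succ (by simpa using h))]
        simp
      · have : ([a].isPrefixOf (c :: t)) = false := by
          simp [List.isPrefixOf, hc]
        rw [this]
        simp only [Bool.false_eq_true, if_false]
        rw [ih _ _ (by simpa using Nat.le_of_succ_le_succ (by simpa using h))]
        simp
        intro h'; exact absurd h'.symm hc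

theorem pvSplitGo (d : Char) : ∀ (fuel : Nat) (l cur : List Char) (acc : List (List Char)),
    l.length < fuel →
    PySem.Chars.splitOn.go [d] fuel l cur acc
      = acc.reverse ++ List.modifyHead (cur.reverse ++ ·) (pvSplitP (· == d) l) := by
  intro fuel
  induction fuel with
  | zero => intro l cur acc h; omega
  | succ n ih =>
    intro l cur acc h
    cases l with
    | nil => simp [PySem.Chars.splitOn.go, pvSplitP]
    | cons c rest =>
      simp only [PySem.Chars.splitOn.go]
      by_cases hc : d = c
      · subst hc
        simp only [List.isPrefixOf, beq_self_eq_true, Bool.true_and, if_true]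
        rw [ih _ _ _ (by simpa using Nat.lt_of_succ_lt_succ (by simpa using h))]
        cases hsp : pvSplitP (· == d) rest with
        | nil => exact absurd hsp (pvSplitP_ne_nil _ _)
        | cons hds tl => simp [pvSplitP, hsp]
      · have hp : ([d].isPrefixOf (c :: rest)) = false := by
          simp [List.isPrefixOf, hc]
        rw [hp]
        simp only [Bool.false_eq_true, if_false]
        rw [ih _ _ _ (by simpa using Nat.lt_of_succ_lt_succ (by simpa using h))]
        have hcd : (c == d) = false := by simp; intro h'; exact absurd h' (fun e => hc e.symm)
        simp only [pvSplitP, hcd, Bool.false_eq_true, if_false]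
        cases hsp : pvSplitP (· == d) rest with
        | nil => exact absurd hsp (pvSplitP_ne_nil _ _)
        | cons hds tl => simp

theorem pvSplitOn_single (d : Char) (l : List Char) :
    PySem.Chars.splitOn l [d] = pvSplitP (· == d) l := by
  rw [PySem.Chars.splitOn, pvSplitGo d _ _ _ _ (by omega)]
  cases hsp : pvSplitP (· == d) l with
  | nil => exact absurd hsp (pvSplitP_ne_nil _ _)
  | cons hds tl => simp

theorem pvReplace_single (a b : Char) (l : List Char) :
    PySem.Chars.replace l [a] [b] = l.map (fun c => if c = a then b else c) := by
  rw [PySem.Chars.replace]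
  simp only [List.isEmpty_cons, Bool.false_eq_true, if_false]
  exact pvReplaceGo a b _ l [] (le_refl _)

theorem pvSplitP_map (p : Char → Bool) (g : Char → Char) (l : List Char) :
    pvSplitP p (l.map g) = (pvSplitP (fun c => p (g c)) l).map (List.map g) := by
  induction l with
  | nil => simp [pvSplitP]
  | cons c cs ih =>
    simp only [List.map_cons, pvSplitP, ih]
    by_cases hp : p (g c)
    · simp [hp]
    · simp only [hp, Bool.false_eq_true, if_false]
      cases hsp : pvSplitP (fun c => p (g c)) cs with
      | nil => exact absurd hsp (pvSplitP_ne_nil _ _)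
      | cons hds tl => simp

theorem pvSplitP_flatMap (p q : Char → Bool) (l : List Char) :
    (pvSplitP p l).flatMap (pvSplitP q) = pvSplitP (fun c => p c || q c) l := by
  induction l with
  | nil => simp [pvSplitP]
  | cons c cs ih =>
    by_cases hp : p c
    · simp [pvSplitP, hp, ih]
    · simp only [pvSplitP, hp, Bool.false_eq_true, if_false, Bool.false_or]
      cases hsp : pvSplitP p cs with
      | nil => exact absurd hsp (pvSplitP_ne_nil _ _)
      | cons hds tl =>
        rw [hsp] at ih
        by_cases hq : q c
        · simp only [List.modifyHead_cons, List.flatMap_cons, pvSplitP, hq, if_true]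
          simp only [List.flatMap_cons] at ih
          simp [← ih]
        · simp only [List.modifyHead_cons, List.flatMap_cons, pvSplitP, hq, Bool.false_eq_true, if_false]
          simp only [List.flatMap_cons] at ih
          cases hsq : pvSplitP q hds with
          | nil => exact absurd hsq (pvSplitP_ne_nil _ _)
          | cons a t =>
            rw [hsq] at ih
            rw [← ih]
            simp

theorem pvSplitP_sep_free (p : Char → Bool) (l : List Char) :
    ∀ t ∈ pvSplitP p l, ∀ c ∈ t, p c = false := by
  induction l with
  | nil => simp [pvSplitP]
  | cons c cs ih =>
    by_cases hp : p c
    · simp only [pvSplitP, hp, if_true]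
      intro t ht
      rcases List.mem_cons.mp ht with h | h
      · subst h; simp
      · exact ih t h
    · simp only [pvSplitP, hp, Bool.false_eq_true, if_false]
      cases hsp : pvSplitP p cs with
      | nil => exact absurd hsp (pvSplitP_ne_nil _ _)
      | cons hds tl =>
        rw [hsp] at ih
        intro t ht
        rcases List.mem_cons.mp (by simpa using ht) with h | h
        · subst h
          intro x hx
          rcases List.mem_cons.mp hx with h' | h'
          · subst h'; simpa using hp
          · exact ih hds (List.mem_cons_self) x h'
        · exact ih t (List.mem_cons_of_mem _ h)

theorem pvSplitP_mem_mem (p : Char → Bool) (l : List Char) :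
    ∀ t ∈ pvSplitP p l, ∀ c ∈ t, c ∈ l := by
  induction l with
  | nil => simp [pvSplitP]
  | cons c cs ih =>
    by_cases hp : p c
    · simp only [pvSplitP, hp, if_true]
      intro t ht
      rcases List.mem_cons.mp ht with h | h
      · subst h; simp
      · intro x hx; exact List.mem_cons_of_mem _ (ih t h x hx)
    · simp only [pvSplitP, hp, Bool.false_eq_true, if_false]
      cases hsp : pvSplitP p cs with
      | nil => exact absurd hsp (pvSplitP_ne_nil _ _)
      | cons hds tl =>
        rw [hsp] at ih
        intro t ht
        rcases List.mem_cons.mp (by simpa using ht) with h | h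
        · subst h
          intro x hx
          rcases List.mem_cons.mp hx with h' | h'
          · subst h'; simp
          · exact List.mem_cons_of_mem _ (ih hds (List.mem_cons_self) x h')
        · intro x hx; exact List.mem_cons_of_mem _ (ih t (List.mem_cons_of_mem _ h) x hx)

theorem pvSplitP_congr (p q : Char → Bool) (l : List Char) (h : ∀ c, p c = q c) :
    pvSplitP p l = pvSplitP q l := by
  induction l with
  | nil => rfl
  | cons c cs ih => simp [pvSplitP, h c, ih]

theorem pvFoldlNested {α β : Type} (f : List β → α → List β) (h : List Char → List α)
    (l : List (List Char)) (init : List β) :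
    l.foldl (fun v ch => (h ch).foldl f v) init = (l.flatMap h).foldl f init := by
  induction l generalizing init with
  | nil => rfl
  | cons x xs ih => simp [List.flatMap_cons, List.foldl_append, ih]

theorem pvFlatMapCongr {α β : Type} (l : List α) (f f' : α → List β)
    (h : ∀ a ∈ l, f a = f' a) : l.flatMap f = l.flatMap f' := by
  induction l with
  | nil => rfl
  | cons x xs ih =>
    simp only [List.flatMap_cons, h x List.mem_cons_self]
    rw [ih (fun a ha => h a (List.mem_cons_of_mem _ ha))]

-- the single-pass scan of B is a fold of pvFlush over the reference split
theorem pvScanInv (s : List Char) : ∀ (values : List String) (token : List Char),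
    pvFlush (s.foldl pvStep (values, token)).1 (s.foldl pvStep (values, token)).2
      = ((pvSplitP pvIsSep s).modifyHead (token ++ ·)).foldl pvFlush values := by
  induction s with
  | nil => intro values token; simp [pvSplitP]
  | cons c cs ih =>
    intro values token
    by_cases hc : pvIsSep c
    · simp only [List.foldl_cons, pvStep, hc, if_true]
      rw [ih]
      simp only [pvSplitP, hc, if_true, List.modifyHead_cons, List.foldl_cons, List.append_nil]
      cases hsp : pvSplitP pvIsSep cs with
      | nil => exact absurd hsp (pvSplitP_ne_nil _ _)
      | cons hds tl => simp
    · simp only [List.foldl_cons, pvStep, hc, Bool.false_eq_true, if_false]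
      rw [ih]
      simp only [pvSplitP, hc, Bool.false_eq_true, if_false]
      cases hsp : pvSplitP pvIsSep cs with
      | nil => exact absurd hsp (pvSplitP_ne_nil _ _)
      | cons hds tl => simp

theorem pvMain (raw : String) : split_env_values_py raw = split_env_values_py_alt raw := by
  show (PySem.Chars.splitOn
      (PySem.Chars.replace (PySem.Chars.replace raw.toList ['\r'] ['\n']) [';'] [',']) ['\n']).foldl
      (fun values chunk => (PySem.Chars.splitOn chunk [',']).foldl pvFlush values) []
    = pvFlush (raw.toList.foldl pvStep ([], [])).1 (raw.toList.foldl pvStep ([], [])).2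
  rw [pvReplace_single, pvReplace_single, List.map_map, pvSplitOn_single]
  simp only [pvSplitOn_single]
  rw [pvFoldlNested, pvSplitP_map, List.flatMap_map]
  have hG : ∀ c : Char,
      (((fun c => if c = ';' then ',' else c) ∘ fun c => if c = '\r' then '\n' else c) c == '\n') = false →
      (((fun c => if c = ';' then ',' else c) ∘ fun c => if c = '\r' then '\n' else c) c == ',') = false →
      ((fun c => if c = ';' then ',' else c) ∘ fun c => if c = '\r' then '\n' else c) c = c := by
    intro c h1 h2
    by_cases hr : c = '\r'
    · subst hr; simp at h1
    · by_cases hs : c = ';'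
      · subst hs; simp at h2
      · simp [Function.comp, if_neg hr, if_neg hs]
  have hIn : ∀ ch ∈ pvSplitP
        (fun c => ((fun c => if c = ';' then ',' else c) ∘ fun c => if c = '\r' then '\n' else c) c == '\n')
        raw.toList,
      pvSplitP (· == ',') (List.map ((fun c => if c = ';' then ',' else c) ∘ fun c => if c = '\r' then '\n' else c) ch)
        = pvSplitP (fun c => ((fun c => if c = ';' then ',' else c) ∘ fun c => if c = '\r' then '\n' else c) c == ',') ch := by
    intro ch hch
    rw [pvSplitP_map]
    have : ∀ t ∈ pvSplitP
        (fun c => ((fun c => if c = ';' then ',' else c) ∘ fun c => if c = '\r' then '\n' else c) c == ',') ch,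
        List.map ((fun c => if c = ';' then ',' else c) ∘ fun c => if c = '\r' then '\n' else c) t = t := by
      intro t ht
      have := fun c hc => hG c
        (pvSplitP_sep_free _ raw.toList ch hch c (pvSplitP_mem_mem _ ch t ht c hc))
        (pvSplitP_sep_free _ ch t ht c hc)
      calc List.map ((fun c => if c = ';' then ',' else c) ∘ fun c => if c = '\r' then '\n' else c) t
          = List.map (fun a => a) t := List.map_congr_left this
        _ = t := by simp
    rw [List.map_congr_left this]
    simp
  rw [pvFlatMapCongr _ _ _ hIn, pvSplitP_flatMap]
  have hsep : ∀ c : Char,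
      ((((fun c => if c = ';' then ',' else c) ∘ fun c => if c = '\r' then '\n' else c) c == '\n')
        || (((fun c => if c = ';' then ',' else c) ∘ fun c => if c = '\r' then '\n' else c) c == ','))
        = pvIsSep c := by
    intro c
    by_cases hr : c = '\r'
    · subst hr; simp [pvIsSep]
    · by_cases hs : c = ';'
      · subst hs; simp [pvIsSep]
      · have h1 : (c == '\r') = false := by simp [hr]
        have h2 : (c == ';') = false := by simp [hs]
        simp [Function.comp, if_neg hr, if_neg hs, pvIsSep, h1, h2]
  rw [pvSplitP_congr _ _ _ hsep, pvScanInv]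
  cases hsp : pvSplitP pvIsSep raw.toList with
  | nil => exact absurd hsp (pvSplitP_ne_nil _ _)
  | cons hds tl => simp

-- ===== VERDICT (by name: the statement is the Claim_ definition above) =====
theorem split_env_values_py_spec : Claim_equal_split_env_values_py := by
  intro raw _
  unfold Spec_split_env_values_py
  exact pvMain raw
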